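-- pv_equiv track=rewrite | github.com/PavanAnganna90/OpsSight-DevOpsVisibilityPlatform | backend/app/utils/security.py | is_safe_url
-- ===== SOURCE A (Python) =====
-- def is_safe_url(url: str) -> bool:
--     """
--     Check if a URL is safe (no file:// or javascript: schemes).
--
--     Args:
--         url: URL to check
--
--     Returns:
--         bool: True if URL is safe
--     """
--     if not url:
--         return False
--
--     url_lower = url.lower().strip()
--
--     # Block dangerous schemes
--     dangerous_schemes = [
--         'javascript:',
--         'file:',
--         'ftp:',
--         'data:',
--         'vbscript:',
--     ]
--
--     for scheme in dangerous_schemes: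
--         if url_lower.startswith(scheme):
--             return False
--
--     return True
-- ===== SOURCE B (Python) =====
-- DANGEROUS_SCHEMES = {'javascript', 'file', 'ftp', 'data', 'vbscript'}
--
-- def is_safe_url(url: str) -> bool:
--     if not url:
--         return False
--     url_lower = url.lower().strip()
--     i = url_lower.find(':')
--     return i < 0 or url_lower[:i] not in DANGEROUS_SCHEMES
-- ===== Notes on version B (the rewrite author's own statement) =====
-- stated objective: idiomatic
-- what changed: Replaces the scan over the five dangerous scheme prefixes by a single find of the first colon plus one set-membership test of the extracted scheme name.
import Mathlib
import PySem

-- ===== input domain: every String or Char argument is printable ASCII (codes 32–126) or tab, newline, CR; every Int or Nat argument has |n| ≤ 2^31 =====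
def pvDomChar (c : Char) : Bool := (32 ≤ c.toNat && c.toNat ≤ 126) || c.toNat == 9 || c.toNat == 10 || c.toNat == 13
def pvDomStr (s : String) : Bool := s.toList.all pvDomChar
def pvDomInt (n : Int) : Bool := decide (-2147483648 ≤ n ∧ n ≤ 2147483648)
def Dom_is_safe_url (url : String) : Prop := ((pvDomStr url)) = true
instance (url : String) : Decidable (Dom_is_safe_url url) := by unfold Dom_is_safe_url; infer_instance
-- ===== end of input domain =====

-- B replaces A's scan over five 'scheme:' prefixes by one find of the first ':' plus a single
-- set-membership test of the extracted scheme name (objective: idiomatic).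

-- ===== PORT A =====
-- A's for-loop over dangerous_schemes with early 'return False'
def is_safe_url_loop (schemes : List (List Char)) (s : List Char) : Bool :=
  match schemes with
  | [] => true
  | sch :: rest => if PySem.Chars.startswith s sch then false else is_safe_url_loop rest s

def is_safe_url (url : String) : Bool :=
  if url.toList.isEmpty then false
  else
    is_safe_url_loop
      ["javascript:".toList, "file:".toList, "ftp:".toList, "data:".toList, "vbscript:".toList]
      (PySem.Chars.strip (PySem.Chars.lower url.toList))

-- ===== PORT B =====
-- the module-level set DANGEROUS_SCHEMES (distinct elements)
def dangerousSchemes : List (List Char) :=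
  ["javascript".toList, "file".toList, "ftp".toList, "data".toList, "vbscript".toList]

def is_safe_url_alt (url : String) : Bool :=
  if url.toList.isEmpty then false
  else
    let s := PySem.Chars.strip (PySem.Chars.lower url.toList)
    let i := PySem.Chars.find s [':']
    if i < 0 then true
    else !(dangerousSchemes.contains (PySem.List.slice s none (some i)))

-- ===== PRECONDITION & SPEC =====
def Spec_is_safe_url (url : String) (out : Bool) : Prop := out = is_safe_url_alt url
instance (url : String) (out : Bool) : Decidable (Spec_is_safe_url url out) := by unfold Spec_is_safe_url; infer_instance

-- ===== CLAIM (what is proved, stated in full; the proofs are below) =====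
def Claim_equal_is_safe_url : Prop := ∀ (url : String), Dom_is_safe_url url → Spec_is_safe_url url (is_safe_url url)

-- ===== LEMMAS AND PROOFS =====

-- a character of s occurring somewhere makes the singleton an infix
lemma singleton_infix_of_mem {c : Char} {s : List Char} (h : c ∈ s) : [c] <:+: s := by
  obtain ⟨u, v, rfl⟩ := List.append_of_mem h
  exact ⟨u, v, by simp⟩

-- if p contains ':' and no ':' occurs in s, p is not a prefix of s
lemma startswith_false_of_no_colon {s p : List Char} (hc : ':' ∈ p)
    (hno : ¬ [':'] <:+: s) : PySem.Chars.startswith s p = false := by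
  rw [Bool.eq_false_iff]
  intro h
  exact hno (((singleton_infix_of_mem hc).trans (List.IsPrefix.isInfix
    ((PySem.Chars.startswith_iff s p).mp h))))

-- the first colon splits s uniquely
lemma first_colon_unique : ∀ (t w r r' : List Char), ':' ∉ t → ':' ∉ w →
    t ++ ':' :: r = w ++ ':' :: r' → t = w := by
  intro t
  induction t with
  | nil =>
    intro w r r' _ hw h
    cases w with
    | nil => rfl
    | cons b w' =>
      simp only [List.nil_append, List.cons_append, List.cons.injEq] at h
      exact absurd (h.1 ▸ List.mem_cons_self) hw
  | cons a t' ih =>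
    intro w r r' ht hw h
    cases w with
    | nil =>
      simp only [List.cons_append, List.nil_append, List.cons.injEq] at h
      exact absurd (h.1 ▸ List.mem_cons_self) ht
    | cons b w' =>
      simp only [List.cons_append, List.cons.injEq] at h
      have := ih w' r r' (fun hm => ht (List.mem_cons_of_mem a hm))
        (fun hm => hw (List.mem_cons_of_mem b hm)) h.2
      rw [h.1, this]

-- when find s ':' = n ≥ 0, s splits as (take n s) ++ ':' :: r with no colon in take n s
lemma find_colon_split {s : List Char} (h : 0 ≤ PySem.Chars.find s [':']) :
    (∃ r, s = s.take (PySem.Chars.find s [':']).toNat ++ ':' :: r) ∧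
      ':' ∉ s.take (PySem.Chars.find s [':']).toNat := by
  obtain ⟨h1, h2⟩ := PySem.Chars.find_spec h
  set n := (PySem.Chars.find s [':']).toNat with hn
  obtain ⟨r, hr⟩ := h1
  constructor
  · exact ⟨r, by rw [show ':' :: r = List.drop n s from hr, List.take_append_drop]⟩
  · intro hm
    obtain ⟨j, hj, hget⟩ := List.mem_iff_getElem.mp hm
    have hjn : j < n := lt_of_lt_of_le hj (by simp)
    have hjs : j < s.length := lt_of_lt_of_le hj (by simp)
    apply h2 j hjn
    have hj' : s[j] = ':' := (List.getElem_take).symm.trans hget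
    rw [List.drop_eq_getElem_cons hjs, hj']
    exact ⟨_, rfl⟩

-- with the colon split fixed, 'startswith s (w ++ [':'])' says exactly 'the scheme is w'
lemma startswith_iff_scheme {s t r w : List Char} (hs : s = t ++ ':' :: r)
    (ht : ':' ∉ t) (hw : ':' ∉ w) :
    PySem.Chars.startswith s (w ++ [':']) = true ↔ t = w := by
  rw [PySem.Chars.startswith_iff]
  constructor
  · rintro ⟨u, hu⟩
    apply first_colon_unique t w r (u) ht hw
    rw [← hs, ← hu]; simp
  · rintro rfl
    exact ⟨r, by rw [hs]; simp⟩

-- the heart: A's prefix loop equals B's scheme extraction, for every stripped/lowered s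
set_option maxRecDepth 4096 in
lemma loop_eq_alt (s : List Char) :
    is_safe_url_loop
      ["javascript:".toList, "file:".toList, "ftp:".toList, "data:".toList, "vbscript:".toList] s =
    (if PySem.Chars.find s [':'] < 0 then true
     else !(dangerousSchemes.contains (PySem.List.slice s none (some (PySem.Chars.find s [':']))))) := by
  by_cases hneg : PySem.Chars.find s [':'] < 0
  · -- no colon in s at all: every prefix test fails, B short-circuits to True
    have heq : PySem.Chars.find s [':'] = -1 := le_antisymm (by omega) (PySem.Chars.neg_one_le_find s [':'])
    have hno : ¬ [':'] <:+: s := (PySem.Chars.find_eq_neg_one_iff s [':']).mp heq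
    have hf : ∀ p : List Char, ':' ∈ p → PySem.Chars.startswith s p = false :=
      fun p hp => startswith_false_of_no_colon hp hno
    rw [if_pos hneg]
    simp only [is_safe_url_loop, hf _ (by decide : ':' ∈ "javascript:".toList),
      hf _ (by decide : ':' ∈ "file:".toList), hf _ (by decide : ':' ∈ "ftp:".toList),
      hf _ (by decide : ':' ∈ "data:".toList), hf _ (by decide : ':' ∈ "vbscript:".toList),
      Bool.false_eq_true, if_false]
  · have hpos : 0 ≤ PySem.Chars.find s [':'] := by omega
    obtain ⟨⟨r, hr⟩, htc⟩ := find_colon_split hpos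
    set t := s.take (PySem.Chars.find s [':']).toNat with htdef
    have hslice : PySem.List.slice s none (some (PySem.Chars.find s [':'])) = t :=
      PySem.List.slice_to s hpos
    have hsw : ∀ w : List Char, ':' ∉ w →
        PySem.Chars.startswith s (w ++ [':']) = decide (t = w) := by
      intro w hw
      by_cases hteq : t = w
      · rw [decide_eq_true hteq]
        exact (startswith_iff_scheme hr htc hw).mpr hteq
      · rw [decide_eq_false hteq, Bool.eq_false_iff]
        exact fun hh => hteq ((startswith_iff_scheme hr htc hw).mp hh)
    have h1 := hsw "javascript".toList (by decide)
    have h2 := hsw "file".toList (by decide)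
    have h3 := hsw "ftp".toList (by decide)
    have h4 := hsw "data".toList (by decide)
    have h5 := hsw "vbscript".toList (by decide)
    have e1 : "javascript:".toList = "javascript".toList ++ [':'] := by decide
    have e2 : "file:".toList = "file".toList ++ [':'] := by decide
    have e3 : "ftp:".toList = "ftp".toList ++ [':'] := by decide
    have e4 : "data:".toList = "data".toList ++ [':'] := by decide
    have e5 : "vbscript:".toList = "vbscript".toList ++ [':'] := by decide
    rw [if_neg hneg, hslice]
    simp only [is_safe_url_loop, e1, e2, e3, e4, e5, h1, h2, h3, h4, h5,
      dangerousSchemes, List.contains_cons, List.contains_nil, Bool.or_false]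
    by_cases c1 : t = ['j','a','v','a','s','c','r','i','p','t'] <;>
      by_cases c2 : t = ['f','i','l','e'] <;>
        by_cases c3 : t = ['f','t','p'] <;>
          by_cases c4 : t = ['d','a','t','a'] <;>
            by_cases c5 : t = ['v','b','s','c','r','i','p','t'] <;>
              simp [c1, c2, c3, c4, c5]

-- ===== VERDICT (by name: the statement is the Claim_ definition above) =====
theorem is_safe_url_spec : Claim_equal_is_safe_url := by
  intro url _
  unfold Spec_is_safe_url is_safe_url is_safe_url_alt
  by_cases h : url.toList.isEmpty
  · simp [h]
  · simp only [h, Bool.false_eq_true, if_false]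
    exact loop_eq_alt _
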